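-- pv_equiv track=rewrite | github.com/Hemant-Jain-Author/Problem-Solving-in-Data-Structures-Algorithms-using-Python | IntroductoryChapters/Analysis.py | fun3
-- ===== SOURCE A (Python) =====
-- def fun3(n):
--     m = 0
--     i = 0
--     while i < n:
--         j = 0
--         while j < i:
--             m += 1
--             j += 1
--         i += 1
--     return m
-- ===== SOURCE B (Python) =====
-- def fun3(n):
--     # closed form: the nested loops count pairs (i, j) with 0 <= j < i < n
--     if n <= 0:
--         return 0
--     return n * (n - 1) // 2
-- ===== Notes on version B (the rewrite author's own statement) =====
-- stated objective: faster
-- what changed: replaced the O(n^2) nested counting loops by the closed form n*(n-1)//2 (0 for n <= 0)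
import Mathlib
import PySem

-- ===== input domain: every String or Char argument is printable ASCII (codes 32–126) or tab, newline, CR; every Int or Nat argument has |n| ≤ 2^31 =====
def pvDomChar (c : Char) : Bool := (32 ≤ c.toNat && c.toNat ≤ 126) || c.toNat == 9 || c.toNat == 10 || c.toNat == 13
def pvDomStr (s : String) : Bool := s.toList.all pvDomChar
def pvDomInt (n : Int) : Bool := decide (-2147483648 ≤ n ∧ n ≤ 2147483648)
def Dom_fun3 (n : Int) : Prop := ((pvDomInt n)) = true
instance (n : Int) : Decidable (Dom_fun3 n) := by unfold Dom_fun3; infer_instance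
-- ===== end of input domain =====

-- B replaces A's O(n^2) nested counting loops by the closed form n*(n-1)//2 (0 for n ≤ 0): asymptotically faster.


-- ===== PORT A =====
-- inner 'while j < i: m += 1; j += 1' (fuel = number of remaining iterations, i - j)
def fun3Inner : Nat → Int → Int
  | 0, m => m
  | k + 1, m => fun3Inner k (m + 1)

-- outer 'while i < n' (fuel = n - i); each iteration runs the inner loop i times
def fun3Outer : Nat → Int → Int → Int
  | 0, _, m => m
  | k + 1, i, m => fun3Outer k (i + 1) (fun3Inner i.toNat m)

def fun3 (n : Int) : Int := fun3Outer n.toNat 0 0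

-- ===== PORT B =====
def fun3_alt (n : Int) : Int :=
  if n ≤ 0 then 0 else PySem.Int.floordiv (n * (n - 1)) 2

-- ===== PRECONDITION & SPEC =====
def Spec_fun3 (n : Int) (out : Int) : Prop := out = fun3_alt n
instance (n : Int) (out : Int) : Decidable (Spec_fun3 n out) := by unfold Spec_fun3; infer_instance

-- ===== CLAIM (what is proved, stated in full; the proofs are below) =====
def Claim_equal_fun3 : Prop := ∀ (n : Int), Dom_fun3 n → Spec_fun3 n (fun3 n)

-- ===== LEMMAS AND PROOFS =====
-- T k = 0 + 1 + ... + (k-1), the count contributed by the inner loops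
def pvTri : Nat → Nat
  | 0 => 0
  | k + 1 => pvTri k + k

theorem fun3Inner_eq (k : Nat) (m : Int) : fun3Inner k m = m + k := by
  induction k generalizing m with
  | zero => simp [fun3Inner]
  | succ k ih => simp only [fun3Inner, ih]; push_cast; ring

theorem fun3Outer_eq (k j : Nat) (m : Int) :
    fun3Outer k (j : Int) m = m + (k : Int) * j + (pvTri k : Int) := by
  induction k generalizing j m with
  | zero => simp [fun3Outer, pvTri]
  | succ k ih =>
    have h1 : ((j : Int)).toNat = j := Int.toNat_natCast j
    have h2 : ((j : Int) + 1) = ((j + 1 : Nat) : Int) := by push_cast; ring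
    simp only [fun3Outer, fun3Inner_eq, h1, h2, ih, pvTri]
    push_cast
    ring

theorem pvTri_double (k : Nat) : 2 * (pvTri k : Int) = (k : Int) * ((k : Int) - 1) := by
  induction k with
  | zero => simp [pvTri]
  | succ k ih => simp only [pvTri]; push_cast; push_cast at ih; ring_nf; ring_nf at ih; omega

theorem fun3_spec : Claim_equal_fun3 := by
  intro n _
  unfold Spec_fun3 fun3 fun3_alt
  by_cases hn : n ≤ 0
  · have : n.toNat = 0 := Int.toNat_of_nonpos hn
    simp [this, fun3Outer, hn]
  · rw [if_neg hn]
    have hk : ((n.toNat : Int)) = n := Int.toNat_of_nonneg (by omega)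
    have he := fun3Outer_eq n.toNat 0 0
    have hd := pvTri_double n.toNat
    rw [hk] at he hd
    rw [PySem.Int.floordiv_eq_ediv_of_pos (by norm_num)]
    push_cast at he
    rw [he]
    omega
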